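-- pv_equiv track=rewrite | github.com/ThomasTrepanier/log6307-final-project | data/interim/stackoverflow/src/python/13_66.py | chains
-- ===== SOURCE A (Python) =====
-- def chains(words, previous_word_index=None):
--     yield []
--     if previous_word_index is not None:
--         previous_letter = words[previous_word_index][-1]
--         words = words[:previous_word_index] + words[previous_word_index + 1:]
--     for i, each_word in enumerate( words ):
--         if previous_word_index is None or each_word.startswith(previous_letter):
--             for tail in chains(words, previous_word_index=i):
--                 yield [each_word] + tail
-- ===== SOURCE B (Python) =====
-- def chains(words, previous_word_index=None):
--     # Iterative pre-order DFS with an explicit stack of (chain, remaining, letter) frames.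
--     if previous_word_index is None:
--         stack = [([], list(words), None)]
--     else:
--         letter = words[previous_word_index][-1]
--         rest = words[:previous_word_index] + words[previous_word_index + 1:]
--         stack = [([], rest, letter)]
--     while stack:
--         chain, remaining, letter = stack.pop()
--         yield chain
--         children = []
--         for i, w in enumerate(remaining):
--             if letter is None or w.startswith(letter):
--                 children.append((chain + [w], remaining[:i] + remaining[i + 1:], w[-1]))
--         stack.extend(reversed(children))
-- ===== Notes on version B (the rewrite author's own statement) =====
-- stated objective: alternative
-- what changed: The recursive generator (re-slicing and re-indexing at each call) is replaced by an explicit iterative DFS over a stack of (chain, remaining, letter) frames, pushing matching children in reverse so the pre-order of emitted chains is preserved.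
import Mathlib
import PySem

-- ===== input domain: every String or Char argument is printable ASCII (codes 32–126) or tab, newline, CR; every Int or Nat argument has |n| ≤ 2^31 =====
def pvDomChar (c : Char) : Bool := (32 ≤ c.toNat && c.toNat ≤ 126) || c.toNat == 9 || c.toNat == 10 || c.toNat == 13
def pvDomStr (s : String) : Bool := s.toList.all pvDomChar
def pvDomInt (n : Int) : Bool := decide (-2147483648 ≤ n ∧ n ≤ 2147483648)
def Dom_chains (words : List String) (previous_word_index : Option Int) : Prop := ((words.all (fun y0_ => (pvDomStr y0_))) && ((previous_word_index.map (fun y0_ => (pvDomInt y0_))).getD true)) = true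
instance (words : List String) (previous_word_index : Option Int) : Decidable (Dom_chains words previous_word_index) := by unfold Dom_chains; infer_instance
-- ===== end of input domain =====

-- B replaces A's recursive generator by an explicit iterative stack DFS (alternative decomposition,
-- same emission order); equivalence is about the list of yielded chains, neither mutates its input.

-- ===== PORT A =====
-- Python's s[-1]; the default is never reached on inputs admitted by Pre_chains
def pyLast (s : String) : Char := (PySem.Str.pyGet? s (-1)).getD ' '

-- A's recursive call chains(words, i) always receives a nonnegative in-range index i (from
-- enumerate); chainsGo is that recursive body (its `else` is unreachable: Python raises there).
def chainsGo (words : List String) (i : Nat) : List (List String) :=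
  if h : i < words.length then
    let letter := pyLast words[i]
    let ws := words.take i ++ words.drop (i + 1)
    [] :: (PySem.List.enumerate ws).flatMap (fun p =>
      if PySem.Chars.startswith p.2.toList [letter] then
        (chainsGo ws p.1.toNat).map (fun t => p.2 :: t)
      else [])
  else [[]]
termination_by words.length
decreasing_by simp; omega

def chains (words : List String) (previous_word_index : Option Int) : List (List String) :=
  match previous_word_index with
  | none =>
      [] :: (PySem.List.enumerate words).flatMap (fun p =>
        (chainsGo words p.1.toNat).map (fun t => p.2 :: t))
  | some i =>
      let letter := pyLast ((PySem.List.pyGet? words i).getD "")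
      let ws := PySem.List.slice words none (some i) ++ PySem.List.slice words (some (i + 1)) none
      [] :: (PySem.List.enumerate ws).flatMap (fun p =>
        if PySem.Chars.startswith p.2.toList [letter] then
          (chainsGo ws p.1.toNat).map (fun t => p.2 :: t)
        else [])

-- ===== PORT B =====
-- Python's `letter is None or w.startswith(letter)`
def pvMatches (letter : Option Char) (w : String) : Bool :=
  match letter with
  | none => true
  | some c => PySem.Chars.startswith w.toList [c]

-- the `children` list built by Source B's inner for-loop from a frame (chain, remaining, letter)
def pvChildren (chain : List String) (remaining : List String) (letter : Option Char) :
    List (List String × List String × Option Char) :=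
  (PySem.List.enumerate remaining).filterMap (fun p =>
    if pvMatches letter p.2 then
      some (chain ++ [p.2], remaining.take p.1.toNat ++ remaining.drop (p.1.toNat + 1),
            some (pyLast p.2))
    else none)

-- termination measure for the while-loop: Σ over frames of (|remaining|+1)!
def pvFrameM (f : List String × List String × Option Char) : Nat := (f.2.1.length + 1).factorial
def pvStackM (st : List (List String × List String × Option Char)) : Nat := (st.map pvFrameM).sum

lemma pv_mem_enumerate {α : Type} (xs : List α) (s : Int) (p : Int × α)
    (hp : p ∈ PySem.List.enumerate xs s) :
    ∃ k : Nat, p.1 = s + k ∧ k < xs.length ∧ xs[k]? = some p.2 := by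
  induction xs generalizing s with
  | nil => simp [PySem.List.enumerate_nil] at hp
  | cons x xs ih =>
    rw [PySem.List.enumerate_cons] at hp
    rcases List.mem_cons.mp hp with h | h
    · exact ⟨0, by simp [h], by simp, by simp [h]⟩
    · obtain ⟨k, hk1, hk2, hk3⟩ := ih (s + 1) h
      exact ⟨k + 1, by push_cast; omega, by simp; omega, by simpa using hk3⟩

lemma pv_mem_enumerate0 {α : Type} (xs : List α) (p : Int × α)
    (hp : p ∈ PySem.List.enumerate xs) :
    p.1.toNat < xs.length ∧ xs[p.1.toNat]? = some p.2 := by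
  obtain ⟨k, hk1, hk2, hk3⟩ := pv_mem_enumerate xs 0 p hp
  have : p.1.toNat = k := by omega
  exact ⟨this ▸ hk2, this ▸ hk3⟩

lemma pvChildren_dec (c : List String) (r : List String) (l : Option Char)
    (rest : List (List String × List String × Option Char)) :
    pvStackM (pvChildren c r l ++ rest) < pvStackM ((c, r, l) :: rest) := by
  have hlen : (pvChildren c r l).length ≤ r.length := by
    calc (pvChildren c r l).length
        ≤ (PySem.List.enumerate r).length := List.length_filterMap_le _ _
      _ = r.length := by simp [PySem.List.length_enumerate]
  have hmem : ∀ f ∈ pvChildren c r l, f.2.1.length + 1 ≤ r.length := by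
    intro f hf
    rw [pvChildren] at hf
    obtain ⟨p, hp, hpf⟩ := List.mem_filterMap.mp hf
    obtain ⟨hlt, -⟩ := pv_mem_enumerate0 _ p hp
    by_cases hc : pvMatches l p.2
    · rw [if_pos hc] at hpf
      obtain rfl := Option.some.inj hpf
      simp
      omega
    · rw [if_neg hc] at hpf
      cases hpf
  have h1 : pvStackM (pvChildren c r l ++ rest)
      = pvStackM (pvChildren c r l) + pvStackM rest := by simp [pvStackM]
  have h2 : pvStackM ((c, r, l) :: rest) = (r.length + 1).factorial + pvStackM rest := by
    simp [pvStackM, pvFrameM]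
  have hsum : pvStackM (pvChildren c r l) ≤ (pvChildren c r l).length * r.length.factorial := by
    have := List.sum_le_card_nsmul ((pvChildren c r l).map pvFrameM) r.length.factorial
      (by
        intro x hx
        obtain ⟨f, hf, rfl⟩ := List.mem_map.mp hx
        exact Nat.factorial_le (hmem f hf))
    simpa [smul_eq_mul, Nat.mul_comm] using this
  have hlt : (pvChildren c r l).length * r.length.factorial < (r.length + 1).factorial := by
    calc (pvChildren c r l).length * r.length.factorial
        ≤ r.length * r.length.factorial := Nat.mul_le_mul_right _ hlen
      _ < (r.length + 1) * r.length.factorial := by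
          have := Nat.factorial_pos r.length
          exact (Nat.mul_lt_mul_right this).mpr (by omega)
      _ = (r.length + 1).factorial := by rw [Nat.factorial_succ]
  omega

-- the Python `while stack:` loop; stack top = list head (Source B pops from the end and pushes the
-- children reversed, which on a head-top stack is exactly `children ++ rest`)
def chainsLoop (stack : List (List String × List String × Option Char)) : List (List String) :=
  match stack with
  | [] => []
  | (chain, remaining, letter) :: rest =>
      chain :: chainsLoop (pvChildren chain remaining letter ++ rest)
termination_by pvStackM stack
decreasing_by exact pvChildren_dec chain remaining letter rest

def chains_alt (words : List String) (previous_word_index : Option Int) : List (List String) :=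
  match previous_word_index with
  | none => chainsLoop [([], words, none)]
  | some i =>
      let letter := pyLast ((PySem.List.pyGet? words i).getD "")
      let rest := PySem.List.slice words none (some i) ++ PySem.List.slice words (some (i + 1)) none
      chainsLoop [([], rest, some letter)]

-- ===== PRECONDITION & SPEC =====
-- Pre_ excludes exactly the inputs on which the Python raises IndexError: a previous_word_index
-- that is out of range or selects the empty string, or (with no index) an empty string in words.
def Pre_chains (words : List String) (previous_word_index : Option Int) : Prop :=
  (match previous_word_index with
   | none => !(words.contains "")
   | some i => (PySem.List.pyGet? words i).elim false (fun w => w != "")) = true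
instance (words : List String) (previous_word_index : Option Int) : Decidable (Pre_chains words previous_word_index) := by unfold Pre_chains; infer_instance

def pvWitness_chains : List String × Option Int := (["ab", "bc"], none)

def Spec_chains (words : List String) (previous_word_index : Option Int) (out : List (List String)) : Prop := out = chains_alt words previous_word_index
instance (words : List String) (previous_word_index : Option Int) (out : List (List String)) : Decidable (Spec_chains words previous_word_index out) := by unfold Spec_chains; infer_instance

-- ===== CLAIM (what is proved, stated in full; the proofs are below) =====
def Claim_equal_chains : Prop := ∀ (words : List String) (previous_word_index : Option Int), Dom_chains words previous_word_index → Pre_chains words previous_word_index → Spec_chains words previous_word_index (chains words previous_word_index)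

-- ===== LEMMAS AND PROOFS =====

-- what one DFS frame with empty chain prefix emits, as a recursion mirroring A's shape
def chainsH (r : List String) (letter : Option Char) : List (List String) :=
  [] :: (PySem.List.enumerate r).flatMap (fun p =>
    if pvMatches letter p.2 then
      (if _h : p.1.toNat < r.length then
        (chainsH (r.take p.1.toNat ++ r.drop (p.1.toNat + 1)) (some (pyLast p.2))).map
          (fun t => p.2 :: t)
      else [])
    else [])
termination_by r.length
decreasing_by simp; omega

lemma pv_flatMap_congr {α β : Type} (l : List α) (f g : α → List β)
    (h : ∀ a ∈ l, f a = g a) : l.flatMap f = l.flatMap g := by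
  induction l with
  | nil => rfl
  | cons x xs ih => simp [List.flatMap_cons, h x (by simp), ih fun a ha => h a (by simp [ha])]

lemma pv_flatMap_filterMap {α β γ : Type} (l : List α) (f : α → Option β) (g : β → List γ) :
    (l.filterMap f).flatMap g = l.flatMap (fun a => ((f a).map g).getD []) := by
  induction l with
  | nil => rfl
  | cons x xs ih =>
    rw [List.filterMap_cons]
    cases hfx : f x <;> simp [List.flatMap_cons, hfx, ih]

-- A's recursive body equals chainsH on the word list with index i removed
lemma chainsGo_eq_chainsH : ∀ n (words : List String), words.length ≤ n →
    ∀ i (h : i < words.length),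
    chainsGo words i = chainsH (words.take i ++ words.drop (i + 1)) (some (pyLast words[i])) := by
  intro n
  induction n with
  | zero => intro words hw i h; omega
  | succ n ih =>
    intro words hw i h
    rw [chainsGo, dif_pos h, chainsH]
    refine congrArg _ (pv_flatMap_congr _ _ _ ?_)
    intro p hp
    obtain ⟨hlt, hget⟩ := pv_mem_enumerate0 _ p hp
    have hws : (words.take i ++ words.drop (i + 1)).length = words.length - 1 := by
      simp; omega
    simp only [pvMatches]
    by_cases hc : PySem.Chars.startswith p.2.toList [pyLast words[i]] = true
    · rw [if_pos hc, if_pos hc, dif_pos hlt]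
      have hp2 : (words.take i ++ words.drop (i + 1))[p.1.toNat]'hlt = p.2 := by
        have h2 := List.getElem?_eq_getElem hlt
        rw [hget] at h2
        exact (Option.some.inj h2).symm
      rw [ih (words.take i ++ words.drop (i + 1)) (by omega) p.1.toNat hlt, hp2]
    · rw [if_neg hc, if_neg hc]

-- expanding one frame: its chain, then the frames of its children
lemma pvChildren_expand (c r : List String) (l : Option Char) :
    (chainsH r l).map (fun t => c ++ t)
      = c :: (pvChildren c r l).flatMap (fun f => (chainsH f.2.1 f.2.2).map (fun t => f.1 ++ t)) := by
  rw [chainsH, List.map_cons, List.append_nil, List.map_flatMap]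
  congr 1
  rw [pvChildren, pv_flatMap_filterMap]
  refine pv_flatMap_congr _ _ _ ?_
  intro p hp
  obtain ⟨hlt, -⟩ := pv_mem_enumerate0 _ p hp
  by_cases hc : pvMatches l p.2 = true
  · simp only [hc, if_true, dif_pos hlt, Option.map_some, Option.getD_some, List.map_map]
    refine List.map_congr_left ?_
    intro t ht
    simp
  · simp [hc]

-- the loop invariant: the stack emits, frame by frame, chainsH prefixed by each frame's chain
lemma chainsLoop_flatMap : ∀ (n : Nat) (st : List (List String × List String × Option Char)),
    pvStackM st ≤ n →
    chainsLoop st = st.flatMap (fun f => (chainsH f.2.1 f.2.2).map (fun t => f.1 ++ t)) := by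
  intro n
  induction n with
  | zero =>
    intro st hst
    match st with
    | [] => rw [chainsLoop]; rfl
    | f :: rest =>
      exfalso
      have : 1 ≤ pvFrameM f := Nat.one_le_iff_ne_zero.mpr (Nat.factorial_ne_zero _)
      simp [pvStackM] at hst
      omega
  | succ n ih =>
    intro st hst
    match st with
    | [] => rw [chainsLoop]; rfl
    | (c, r, l) :: rest =>
      have hdec := pvChildren_dec c r l rest
      have hm : pvStackM ((c, r, l) :: rest) ≤ n + 1 := hst
      rw [chainsLoop, ih (pvChildren c r l ++ rest) (by omega), List.flatMap_append,
          List.flatMap_cons, pvChildren_expand c r l, List.cons_append]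

-- A's top-level loop (letter present, startswith filter) equals chainsH ws (some letter)
lemma chains_some_branch (ws : List String) (c : Char) :
    ([] : List String) :: (PySem.List.enumerate ws).flatMap (fun p =>
      if PySem.Chars.startswith p.2.toList [c] then
        (chainsGo ws p.1.toNat).map (fun t => p.2 :: t)
      else []) = chainsH ws (some c) := by
  rw [chainsH]
  refine congrArg _ (pv_flatMap_congr _ _ _ ?_)
  intro p hp
  obtain ⟨hlt, hget⟩ := pv_mem_enumerate0 _ p hp
  simp only [pvMatches]
  by_cases hc : PySem.Chars.startswith p.2.toList [c] = true
  · rw [if_pos hc, if_pos hc, dif_pos hlt]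
    have hp2 : ws[p.1.toNat]'hlt = p.2 := by
      have h2 := List.getElem?_eq_getElem hlt
      rw [hget] at h2
      exact (Option.some.inj h2).symm
    rw [chainsGo_eq_chainsH ws.length ws le_rfl p.1.toNat hlt, hp2]
  · rw [if_neg hc, if_neg hc]

-- A's top-level loop with no letter (no filter) equals chainsH ws none
lemma chains_none_branch (ws : List String) :
    ([] : List String) :: (PySem.List.enumerate ws).flatMap (fun p =>
      (chainsGo ws p.1.toNat).map (fun t => p.2 :: t)) = chainsH ws none := by
  rw [chainsH]
  refine congrArg _ (pv_flatMap_congr _ _ _ ?_)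
  intro p hp
  obtain ⟨hlt, hget⟩ := pv_mem_enumerate0 _ p hp
  simp only [pvMatches, if_pos, dif_pos hlt]
  have hp2 : ws[p.1.toNat]'hlt = p.2 := by
    have h2 := List.getElem?_eq_getElem hlt
    rw [hget] at h2
    exact (Option.some.inj h2).symm
  rw [chainsGo_eq_chainsH ws.length ws le_rfl p.1.toNat hlt, hp2]

-- a one-frame stack with empty chain emits exactly chainsH
lemma chainsLoop_single (r : List String) (l : Option Char) :
    chainsLoop [([], r, l)] = chainsH r l := by
  rw [chainsLoop_flatMap (pvStackM [([], r, l)]) _ le_rfl]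
  simp

-- ===== VERDICT (by name: the statement is the Claim_ definition above) =====
theorem chains_spec : Claim_equal_chains := by
  intro words pwi _ _
  show chains words pwi = chains_alt words pwi
  match pwi with
  | none =>
    rw [chains, chains_alt, chainsLoop_single, chains_none_branch]
  | some i =>
    rw [chains, chains_alt, chainsLoop_single, chains_some_branch]
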